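-- pv_equiv track=rewrite | github.com/mattias-lundell/aoc2020 | 20.py | corners
-- ===== SOURCE A (Python) =====
-- from collections import Counter
--
-- def count_edges(tiles):
--     cnt = Counter()
--     for tile in tiles.values():
--         cnt.update(edges(tile))
--     for tile in tiles.values():
--         cnt.update(edges(tile[::-1]))
--     return cnt
--
-- def edges(tile):
--     return [
--         tile[0],
--         tile[-1][::-1],  # reverse to make matching easier
--         ''.join(row[-1] for row in tile),
--         ''.join(row[0] for row in tile[::-1]),
--     ]
--
-- def corners(tiles):
--     res = []
--     counts = count_edges(tiles)
--     for tile_id, tile in tiles.items():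
--         unique = 0
--         for edge in edges(tile):
--             if counts[edge] == 1:
--                 unique += 1
--         if unique == 2:
--             res.append(tile_id)
--
--     return res
-- ===== SOURCE B (Python) =====
-- # Same corner finding, but without Counter: each edge's total multiplicity is
-- # recomputed by a nested scan over all tiles in both orientations.
-- def edges(tile):
--     return [
--         tile[0],
--         tile[-1][::-1],
--         ''.join(row[-1] for row in tile),
--         ''.join(row[0] for row in tile[::-1]),
--     ]
--
-- def multiplicity(edge, tiles):
--     total = 0
--     for tile in tiles.values():
--         total += edges(tile).count(edge) + edges(tile[::-1]).count(edge)
--     return total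
--
-- def corners(tiles):
--     res = []
--     for tile_id, tile in tiles.items():
--         unique = sum(1 for e in edges(tile) if multiplicity(e, tiles) == 1)
--         if unique == 2:
--             res.append(tile_id)
--     return res
-- ===== Notes on version B (the rewrite author's own statement) =====
-- stated objective: alternative
-- what changed: Drops count_edges/Counter entirely: each edge's multiplicity is recomputed by a nested rescan over all tiles in both orientations, instead of looking it up in a precomputed frequency counter.
import Mathlib
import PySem

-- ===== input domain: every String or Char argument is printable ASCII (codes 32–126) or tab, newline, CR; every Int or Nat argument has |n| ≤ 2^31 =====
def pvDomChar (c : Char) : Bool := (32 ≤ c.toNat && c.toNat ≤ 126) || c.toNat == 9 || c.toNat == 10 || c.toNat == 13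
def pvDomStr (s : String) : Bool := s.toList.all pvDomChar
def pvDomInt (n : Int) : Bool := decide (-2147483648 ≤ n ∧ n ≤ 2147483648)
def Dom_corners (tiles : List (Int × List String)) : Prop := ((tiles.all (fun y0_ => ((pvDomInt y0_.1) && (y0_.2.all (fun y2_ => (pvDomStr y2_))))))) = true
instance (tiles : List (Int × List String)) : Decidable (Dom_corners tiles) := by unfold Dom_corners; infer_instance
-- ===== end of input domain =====

-- B replaces the Counter edge index by a per-edge nested rescan of all tiles (objective: alternative).
-- Dict parameter convention: the Python dict 'tiles' is the association list here.

-- ===== PORT A =====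
-- edges(tile): shared helper of both Pythons; rows as List Char.
-- pyGetD defaults are exact under Pre_corners (nonempty tile, nonempty rows).
def edgesC (rows : List (List Char)) : List (List Char) :=
  [ PySem.List.pyGetD rows 0 [],
    (PySem.List.pyGetD rows (-1) []).reverse,
    rows.map (fun r => PySem.List.pyGetD r (-1) ' '),
    rows.reverse.map (fun r => PySem.List.pyGetD r 0 ' ') ]

-- count_edges(tiles): a Counter updated by edges(tile), then by edges(tile[::-1])
def countEdges (tiles : List (Int × List String)) : PySem.Dict (List Char) Int :=
  let d1 := tiles.foldl
    (fun d p => (edgesC (p.2.map String.toList)).foldl (fun d e => d.modify e 0 (· + 1)) d)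
    PySem.Dict.empty
  tiles.foldl
    (fun d p => (edgesC ((p.2.map String.toList).reverse)).foldl (fun d e => d.modify e 0 (· + 1)) d)
    d1

def corners (tiles : List (Int × List String)) : List Int :=
  let counts := countEdges tiles
  tiles.foldl
    (fun res p =>
      let u := (edgesC (p.2.map String.toList)).foldl
        (fun u e => if counts.getD e 0 = 1 then u + 1 else u) (0 : Int)
      if u = 2 then res ++ [p.1] else res)
    []

-- ===== PORT B =====
-- multiplicity(edge, tiles): nested rescan over all tiles, both orientations
def multB (e : List Char) (tiles : List (Int × List String)) : Int :=
  tiles.foldl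
    (fun total p =>
      total + ((edgesC (p.2.map String.toList)).count e : Int)
            + ((edgesC ((p.2.map String.toList).reverse)).count e : Int))
    0

def corners_alt (tiles : List (Int × List String)) : List Int :=
  tiles.foldl
    (fun res p =>
      let u := ((edgesC (p.2.map String.toList)).countP (fun e => multB e tiles == 1) : Int)
      if u = 2 then res ++ [p.1] else res)
    []

-- ===== PRECONDITION & SPEC =====
-- Pre_ excludes tiles that are empty or contain an empty row (A raises IndexError there),
-- and duplicate tile ids (the Python argument is a dict, which cannot carry them;
-- the association-list reading of such an input is ambiguous).
def Pre_corners (tiles : List (Int × List String)) : Prop :=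
  (tiles.map Prod.fst).Nodup ∧ ∀ p ∈ tiles, p.2 ≠ [] ∧ ∀ r ∈ p.2, r ≠ ""
instance (tiles : List (Int × List String)) : Decidable (Pre_corners tiles) := by
  unfold Pre_corners; infer_instance

def pvWitness_corners : (List (Int × List String)) :=
  [(1, ["ab", "cd"]), (2, ["ab", "ef"])]

def Spec_corners (tiles : List (Int × List String)) (out : List Int) : Prop := out = corners_alt tiles
instance (tiles : List (Int × List String)) (out : List Int) : Decidable (Spec_corners tiles out) := by
  unfold Spec_corners; infer_instance

-- ===== CLAIM (what is proved, stated in full; the proofs are below) =====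
def Claim_equal_corners : Prop :=
  ∀ (tiles : List (Int × List String)), Dom_corners tiles → Pre_corners tiles → Spec_corners tiles (corners tiles)

-- ===== LEMMAS AND PROOFS =====

-- the nested Counter-update loop counts occurrences across all tiles
lemma getD_doubleFold (g : (Int × List String) → List (List Char))
    (ts : List (Int × List String)) (d : PySem.Dict (List Char) Int) (v : List Char) :
    (ts.foldl (fun d p => (g p).foldl (fun d e => d.modify e 0 (· + 1)) d) d).getD v 0
      = d.getD v 0 + (ts.map (fun p => ((g p).count v : Int))).sum := by
  induction ts generalizing d with
  | nil => simp
  | cons p ts ih =>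
      simp only [List.foldl_cons, List.map_cons, List.sum_cons, ih,
        PySem.Dict.getD_foldl_modify_add_one]
      ring

-- B's rescan loop, in its exact shape, as a sum over the tiles
lemma multB_fold (v : List Char) (ts : List (Int × List String)) (a : Int) :
    ts.foldl
      (fun total p =>
        total + ((edgesC (p.2.map String.toList)).count v : Int)
              + ((edgesC ((p.2.map String.toList).reverse)).count v : Int)) a
      = a + (ts.map (fun p => ((edgesC (p.2.map String.toList)).count v : Int)
              + ((edgesC ((p.2.map String.toList).reverse)).count v : Int))).sum := by
  induction ts generalizing a with
  | nil => simp
  | cons p ts ih => simp only [List.foldl_cons, List.map_cons, List.sum_cons, ih]; ring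

lemma counts_eq_mult (tiles : List (Int × List String)) (v : List Char) :
    (countEdges tiles).getD v 0 = multB v tiles := by
  unfold countEdges multB
  rw [multB_fold]
  simp only [getD_doubleFold]
  simp [PySem.Dict.getD, PySem.Dict.empty, PySem.Dict.get?, List.sum_map_add]

-- ===== VERDICT (by name: the statement is the Claim_ definition above) =====
theorem corners_spec : Claim_equal_corners := by
  intro tiles _ _
  unfold Spec_corners corners corners_alt
  apply PySem.List.foldl_congr_mem
  intro res p _
  rw [PySem.List.foldl_ite_add_one (p := fun e => (countEdges tiles).getD e 0 = 1)]
  have hd : (fun e : List Char => decide ((countEdges tiles).getD e 0 = 1))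
      = (fun e => multB e tiles == 1) := by
    funext e; rw [counts_eq_mult]; rfl
  simp only [zero_add, hd]
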